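-- pv_equiv track=rewrite | github.com/mpoeverlein/advent-of-code | 2023/a-03-01.py | get_number_coordinates
-- ===== SOURCE A (Python) =====
-- def get_new_number_length(s):
--     number_string = ''
--     for char in s:
--         if char.isdigit():
--             number_string += char
--         else:
--             break
--     return len(number_string)
--
-- def get_number_coordinates(lines):
--     coordinates = []
--     for line_index, line in enumerate(lines):
--         line = line.rstrip()
--         char_index = 0
--         while char_index < len(line):
--             char = line[char_index]
--             if not char.isdigit():
--                 char_index += 1
--                 continue
--             number_length = get_new_number_length(line[char_index:])
--             this_coordinate = []
--             for i in range(number_length):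
--                 this_coordinate.append([line_index, char_index+i])
--             coordinates.append(this_coordinate)
--             char_index += number_length
--     return coordinates
-- ===== SOURCE B (Python) =====
-- def get_number_coordinates(lines):
--     # Single pass per line: collect the current digit run directly, no slicing.
--     coordinates = []
--     for line_index, line in enumerate(lines):
--         line = line.rstrip()
--         run = []
--         for char_index, char in enumerate(line):
--             if char.isdigit():
--                 run.append([line_index, char_index])
--             else:
--                 if run:
--                     coordinates.append(run)
--                     run = []
--         if run:
--             coordinates.append(run)
--     return coordinates
-- ===== Notes on version B (the rewrite author's own statement) =====
-- stated objective: alternative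
-- what changed: Replaces the index-based while loop that re-slices the remaining line and re-scans it with a helper to measure each number with a single for-pass that accumulates the current digit run directly.
import Mathlib
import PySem

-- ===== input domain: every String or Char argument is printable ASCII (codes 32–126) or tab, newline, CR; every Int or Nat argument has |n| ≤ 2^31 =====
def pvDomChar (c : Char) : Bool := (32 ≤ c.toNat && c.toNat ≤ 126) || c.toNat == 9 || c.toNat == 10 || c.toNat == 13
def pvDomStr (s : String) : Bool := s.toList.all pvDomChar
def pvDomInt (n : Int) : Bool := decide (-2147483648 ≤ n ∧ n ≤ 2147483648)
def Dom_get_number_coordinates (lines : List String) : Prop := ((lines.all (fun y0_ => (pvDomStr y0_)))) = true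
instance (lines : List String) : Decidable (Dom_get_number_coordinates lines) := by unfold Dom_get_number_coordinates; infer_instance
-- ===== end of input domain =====

-- B is a single pass per line collecting each digit run directly, instead of A's
-- while loop that slices the remaining line and rescans it to measure each number.

-- ===== PORT A =====
-- number_string accumulation of get_new_number_length
def pvGnnlGo (acc : List Char) (s : List Char) : List Char :=
  match s with
  | [] => acc
  | c :: rest => if PySem.Chars.isdigit c then pvGnnlGo (acc ++ [c]) rest else acc

def get_new_number_length (s : List Char) : Nat := (pvGnnlGo [] s).length

-- termination fact cited by pvLoopA's decreasing_by: a number starting with a digit has length ≥ 1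
theorem pvGnnlGo_eq (acc s : List Char) : pvGnnlGo acc s = acc ++ s.takeWhile PySem.Chars.isdigit := by
  induction s generalizing acc with
  | nil => simp [pvGnnlGo]
  | cons c rest ih =>
    simp only [pvGnnlGo, List.takeWhile]
    by_cases h : PySem.Chars.isdigit c <;> simp [h, ih]

theorem pvGnnl_pos (c : Char) (rest : List Char) (h : PySem.Chars.isdigit c = true) :
    1 ≤ get_new_number_length (c :: rest) := by
  simp [get_new_number_length, pvGnnlGo_eq, List.takeWhile, h]

-- the while loop of A (char_index-based, slicing the remaining line)
def pvLoopA (lcs : List Char) (li : Int) (ci : Nat) (acc : List (List (List Int))) :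
    List (List (List Int)) :=
  if h : ci < lcs.length then
    let c := lcs[ci]
    if hd : PySem.Chars.isdigit c = true then
      let nl := get_new_number_length (lcs.drop ci)
      let this_coordinate := (List.range nl).foldl (fun t (i : Nat) => t ++ [[li, ((ci + i : Nat) : Int)]]) []
      pvLoopA lcs li (ci + nl) (acc ++ [this_coordinate])
    else
      pvLoopA lcs li (ci + 1) acc
  else acc
termination_by lcs.length - ci
decreasing_by
  · have h1 : 1 ≤ get_new_number_length (lcs.drop ci) := by
      have hdrop : lcs.drop ci = lcs[ci] :: lcs.drop (ci + 1) :=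
        List.drop_eq_getElem_cons h
      rw [hdrop]; exact pvGnnl_pos _ _ hd
    omega
  · omega

def get_number_coordinates (lines : List String) : List (List (List Int)) :=
  (PySem.List.enumerate lines).foldl
    (fun acc p => pvLoopA (PySem.Str.rstrip p.2).toList p.1 0 acc) []

-- ===== PORT B =====
-- single pass: run = current digit run's coordinates, flushed at each non-digit and at end of lcs
def pvLoopB (li : Int) (ci : Nat) (cs : List Char) (run : List (List Int))
    (acc : List (List (List Int))) : List (List (List Int)) :=
  match cs with
  | [] => if run.isEmpty then acc else acc ++ [run]
  | c :: rest =>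
    if PySem.Chars.isdigit c then
      pvLoopB li (ci + 1) rest (run ++ [[li, (ci : Int)]]) acc
    else
      pvLoopB li (ci + 1) rest [] (if run.isEmpty then acc else acc ++ [run])

def get_number_coordinates_alt (lines : List String) : List (List (List Int)) :=
  (PySem.List.enumerate lines).foldl
    (fun acc p => pvLoopB p.1 0 (PySem.Str.rstrip p.2).toList [] acc) []

-- ===== PRECONDITION & SPEC =====
def Spec_get_number_coordinates (lines : List String) (out : List (List (List Int))) : Prop := out = get_number_coordinates_alt lines
instance (lines : List String) (out : List (List (List Int))) : Decidable (Spec_get_number_coordinates lines out) := by unfold Spec_get_number_coordinates; infer_instance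

-- ===== CLAIM (what is proved, stated in full; the proofs are below) =====
def Claim_equal_get_number_coordinates : Prop := ∀ (lines : List String), Dom_get_number_coordinates lines → Spec_get_number_coordinates lines (get_number_coordinates lines)

-- ===== LEMMAS AND PROOFS =====

-- A's range-loop builds the run of coordinates ci, ci+1, …
theorem pvFoldAppend {α β : Type} (l : List α) (f : α → β) (t0 : List β) :
    l.foldl (fun t i => t ++ [f i]) t0 = t0 ++ l.map f := by
  induction l generalizing t0 with
  | nil => simp
  | cons a l ih => simp [List.foldl_cons, ih]

def pvRun (li : Int) (ci : Nat) (n : Nat) : List (List Int) :=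
  (List.range n).map (fun i => [li, ((ci + i : Nat) : Int)])

theorem pvRun_length (li : Int) (ci n : Nat) : (pvRun li ci n).length = n := by
  simp [pvRun]

theorem pvRun_nonempty (li : Int) (ci n : Nat) (h : 1 ≤ n) : (pvRun li ci n).isEmpty = false := by
  rw [List.isEmpty_eq_false_iff, ← List.length_pos_iff, pvRun_length]
  omega

theorem pvRun_succ (li : Int) (ci n : Nat) :
    pvRun li ci (n + 1) = [li, (ci : Int)] :: pvRun li (ci + 1) n := by
  simp only [pvRun, List.range_succ_eq_map, List.map_cons, List.map_map,
    Function.comp_def, Nat.add_zero, List.cons.injEq, List.map_inj_left]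
  refine ⟨trivial, fun a _ => ?_⟩
  simp
  omega

theorem pvDropWhile_head {α : Type} (p : α → Bool) :
    ∀ (l : List α) (c : α) (rest' : List α), l.dropWhile p = c :: rest' → p c = false := by
  intro l
  induction l with
  | nil => intro c rest' h; simp [List.dropWhile] at h
  | cons a l ih =>
    intro c rest' h
    by_cases ha : p a
    · rw [List.dropWhile_cons_of_pos ha] at h
      exact ih c rest' h
    · rw [List.dropWhile_cons_of_neg ha] at h
      cases h
      simpa using ha

-- B consumes a block of digits by extending the current run
theorem pvLoopB_digits (li : Int) (ds : List Char) (hds : ∀ c ∈ ds, PySem.Chars.isdigit c = true) :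
    ∀ (ci : Nat) (rest : List Char) (run : List (List Int)) (acc : List (List (List Int))),
    pvLoopB li ci (ds ++ rest) run acc =
      pvLoopB li (ci + ds.length) rest (run ++ pvRun li ci ds.length) acc := by
  induction ds with
  | nil => intro ci rest run acc; simp [pvRun]
  | cons d ds ih =>
    intro ci rest run acc
    have hd : PySem.Chars.isdigit d = true := hds d (by simp)
    have hds' : ∀ c ∈ ds, PySem.Chars.isdigit c = true := fun c hc => hds c (by simp [hc])
    simp only [List.cons_append, pvLoopB, hd, if_pos]
    rw [ih hds' (ci + 1) rest (run ++ [[li, (ci : Int)]]) acc]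
    have h1 : ci + 1 + ds.length = ci + (d :: ds).length := by simp; omega
    have h2 : pvRun li ci (d :: ds).length = [li, (ci : Int)] :: pvRun li (ci + 1) ds.length := by
      rw [List.length_cons, pvRun_succ]
    rw [h1, h2]
    simp
  
-- flushing a non-empty run before a non-digit (or lcs end) equals carrying it
theorem pvLoopB_flush (li : Int) (ci : Nat) (rest : List Char) (run : List (List Int))
    (acc : List (List (List Int))) (hrun : run.isEmpty = false)
    (hrest : rest = [] ∨ ∃ c rest', rest = c :: rest' ∧ PySem.Chars.isdigit c = false) :
    pvLoopB li ci rest run acc = pvLoopB li ci rest [] (acc ++ [run]) := by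
  rcases hrest with h | ⟨c, rest', hr, hc⟩
  · subst h; simp [pvLoopB, hrun]
  · subst hr; simp [pvLoopB, hc, hrun]

-- main per-lcs invariant: A from index ci equals B on the remaining suffix
theorem pvLoopA_eq_loopB (lcs : List Char) (li : Int) :
    ∀ (n ci : Nat) (acc : List (List (List Int))), lcs.length - ci ≤ n →
    pvLoopA lcs li ci acc = pvLoopB li ci (lcs.drop ci) [] acc := by
  intro n
  induction n with
  | zero =>
    intro ci acc h
    have hci : lcs.length ≤ ci := by omega
    rw [pvLoopA]
    simp [Nat.not_lt.mpr hci, List.drop_eq_nil_of_le hci, pvLoopB]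
  | succ n ih =>
    intro ci acc h
    by_cases hci : ci < lcs.length
    · have hdrop : lcs.drop ci = lcs[ci] :: lcs.drop (ci + 1) :=
        List.drop_eq_getElem_cons hci
      by_cases hd : PySem.Chars.isdigit lcs[ci] = true
      · -- digit branch
        set s := lcs.drop ci with hs
        set ds := s.takeWhile PySem.Chars.isdigit with hds
        set rest := s.dropWhile PySem.Chars.isdigit with hrest
        have hsplit : s = ds ++ rest := (List.takeWhile_append_dropWhile).symm
        have hnl : get_new_number_length s = ds.length := by
          simp [get_new_number_length, pvGnnlGo_eq, hds]
        have hdslen : 1 ≤ ds.length := by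
          have := pvGnnl_pos lcs[ci] (lcs.drop (ci+1)) hd
          rw [← hdrop, hnl] at this; exact this
        have hdrop2 : lcs.drop (ci + ds.length) = rest := by
          rw [← List.drop_drop, ← hs, hsplit, List.drop_left']
          rfl
        have hrestshape : rest = [] ∨ ∃ c rest', rest = c :: rest' ∧ PySem.Chars.isdigit c = false := by
          cases hr : rest with
          | nil => exact Or.inl rfl
          | cons c rest' =>
            refine Or.inr ⟨c, rest', rfl, ?_⟩
            exact pvDropWhile_head PySem.Chars.isdigit s c rest' (hrest ▸ hr)
        rw [pvLoopA]
        simp only [hci, dif_pos, hd, ← hs, hnl]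
        rw [ih (ci + ds.length) (acc ++ [(List.range ds.length).foldl (fun t (i : Nat) => t ++ [[li, ((ci + i : Nat) : Int)]]) []]) (by omega)]
        rw [pvFoldAppend (List.range ds.length) (fun i => [li, ((ci + i : Nat) : Int)]) []]
        rw [hsplit, pvLoopB_digits li ds (fun c hc => List.mem_takeWhile_imp (hds ▸ hc)) ci rest [] acc]
        rw [hdrop2]
        conv_rhs => rw [List.nil_append]
        rw [pvLoopB_flush li (ci + ds.length) rest (pvRun li ci ds.length) acc
          (pvRun_nonempty li ci ds.length hdslen) hrestshape]
        simp [pvRun]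
      · -- non-digit branch
        rw [pvLoopA]
        simp only [hci, dif_pos, hd]
        rw [ih (ci + 1) acc (by omega)]
        rw [hdrop]
        simp [pvLoopB, hd]
    · rw [pvLoopA]
      simp [hci, List.drop_eq_nil_of_le (Nat.not_lt.mp hci), pvLoopB]

theorem pvLine_eq (lcs : List Char) (li : Int) (acc : List (List (List Int))) :
    pvLoopA lcs li 0 acc = pvLoopB li 0 lcs [] acc := by
  have := pvLoopA_eq_loopB lcs li lcs.length 0 acc (by omega)
  simpa using this

theorem pvFoldl_eq (l : List (Int × String)) :
    ∀ acc, l.foldl (fun acc p => pvLoopA (PySem.Str.rstrip p.2).toList p.1 0 acc) acc =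
      l.foldl (fun acc p => pvLoopB p.1 0 (PySem.Str.rstrip p.2).toList [] acc) acc := by
  induction l with
  | nil => intro acc; rfl
  | cons p l ih =>
    intro acc
    simp only [List.foldl_cons, pvLine_eq]

-- ===== VERDICT (by name: the statement is the Claim_ definition above) =====
theorem get_number_coordinates_spec : Claim_equal_get_number_coordinates := by
  intro lines _
  unfold Spec_get_number_coordinates get_number_coordinates get_number_coordinates_alt
  exact pvFoldl_eq _ []
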